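-- pv_equiv track=rewrite | github.com/rmorriscpux/daily-coding-challenges | challenge_114.py | reverseStringWithDelimiters
-- ===== SOURCE A (Python) =====
-- from typing import Set
--
-- def reverseStringWithDelimiters(word_string: str, delimiters: Set[str]):
--     words, spaces = [], []
--
--     # Determine if the string starts with a delimiter or not.
--     on_word = word_string[0] not in delimiters
--     new_word = ""
--
--     # Build two lists, one with words, one with delimiters (spaces)
--     for i in range(0, len(word_string)):
--         if word_string[i] in delimiters and on_word:
--             words.insert(0, new_word)
--             new_word = ""
--             on_word = False
--         elif not (word_string[i] in delimiters or on_word):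
--             spaces.append(new_word)
--             new_word = ""
--             on_word = True
--
--         new_word += word_string[i]
--     # Catch last word/space.
--     if on_word:
--         words.insert(0, new_word)
--     else:
--         spaces.append(new_word)
--
--     # Now zipper merge the two lists into a single string and return.
--     out_str = ""
--     on_word = word_string[0] not in delimiters
--     for i in range(0, len(words) + len(spaces)):
--         if on_word:
--             out_str += words[i//2]
--         else:
--             out_str += spaces[i//2]
--         on_word = not on_word
--
--     return out_str
-- ===== SOURCE B (Python) =====
-- def reverseStringWithDelimiters(word_string, delimiters):
--     # One tagged run list instead of two parallel lists + parity zipper.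
--     runs = []  # (is_delimiter, chars of the run)
--     for ch in word_string:
--         is_d = ch in delimiters
--         if runs and runs[-1][0] == is_d:
--             runs[-1][1].append(ch)
--         else:
--             runs.append((is_d, [ch]))
--     rev_words = iter([t for is_d, t in runs if not is_d][::-1])
--     return "".join("".join(t if is_d else next(rev_words)) for is_d, t in runs)
-- ===== Notes on version B (the rewrite author's own statement) =====
-- stated objective: simpler
-- what changed: B tokenizes the string once into a single ordered list of runs tagged word-or-delimiter, reverses the word texts, and rebuilds in one pass consuming the reversed words, replacing A's two parallel lists plus parity/i//2 zipper merge.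
import Mathlib
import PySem

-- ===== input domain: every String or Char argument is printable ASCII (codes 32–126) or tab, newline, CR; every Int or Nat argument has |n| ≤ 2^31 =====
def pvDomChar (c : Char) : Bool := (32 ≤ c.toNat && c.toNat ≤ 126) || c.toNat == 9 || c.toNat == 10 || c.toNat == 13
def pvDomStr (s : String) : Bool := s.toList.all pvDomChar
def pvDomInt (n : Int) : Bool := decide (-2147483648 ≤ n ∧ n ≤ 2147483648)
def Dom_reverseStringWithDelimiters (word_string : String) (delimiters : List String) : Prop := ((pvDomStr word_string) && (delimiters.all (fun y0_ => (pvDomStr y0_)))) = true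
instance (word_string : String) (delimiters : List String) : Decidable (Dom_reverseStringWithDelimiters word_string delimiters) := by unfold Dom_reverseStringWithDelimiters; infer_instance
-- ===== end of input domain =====

-- B replaces A's two parallel lists + parity/i//2 zipper by one tagged run list,
-- a reversed word list and a single rebuild pass (objective: simpler).
-- ===== PORT A =====
-- membership test `word_string[i] in delimiters` (a char against a set of strings)
def pvIsDelim (delimiters : List String) (c : Char) : Bool := delimiters.contains (String.singleton c)

-- one iteration of A's first loop; state = (words, spaces, on_word, new_word)
def pvStepA (d : Char → Bool) (st : List (List Char) × List (List Char) × Bool × List Char) (c : Char) :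
    List (List Char) × List (List Char) × Bool × List Char :=
  if d c && st.2.2.1 then (st.2.2.2 :: st.1, st.2.1, false, [c])
  else if !(d c || st.2.2.1) then (st.1, st.2.1 ++ [st.2.2.2], true, [c])
  else (st.1, st.2.1, st.2.2.1, st.2.2.2 ++ [c])

-- one iteration of A's zipper loop; i//2 on the nonnegative loop index (Nat division exact here)
def pvZStep (W S : List (List Char)) (st : List Char × Bool) (i : Nat) : List Char × Bool :=
  if st.2 then (st.1 ++ W.getD (i / 2) [], !st.2) else (st.1 ++ S.getD (i / 2) [], !st.2)

def reverseStringWithDelimiters (word_string : String) (delimiters : List String) : String :=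
  match word_string.toList with
  | [] => ""  -- Python raises IndexError here (word_string[0]); excluded by Pre_
  | c0 :: _ =>
    let d := pvIsDelim delimiters
    let ow0 := !(d c0)
    let st := word_string.toList.foldl (pvStepA d) ([], [], ow0, [])
    let ws := if st.2.2.1 then st.2.2.2 :: st.1 else st.1
    let ss := if st.2.2.1 then st.2.1 else st.2.1 ++ [st.2.2.2]
    -- zipper loop: indices 0 .. len-1 are nonnegative, Nat range encoding exact
    String.mk ((List.range (ws.length + ss.length)).foldl (pvZStep ws ss) ([], ow0)).1

-- ===== PORT B =====
-- B's run builder: extend the last run or append a fresh one, tag = is_delimiter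
def pvStepRuns (d : Char → Bool) (rs : List (Bool × List Char)) (c : Char) : List (Bool × List Char) :=
  match rs.getLast? with
  | some (b, t) => if b == d c then rs.dropLast ++ [(b, t ++ [c])] else rs ++ [(d c, [c])]
  | none => [(d c, [c])]

-- B's rebuild: emit delimiter runs, pop the next reversed word for word runs
def pvStepFill (st : List Char × List (List Char)) (r : Bool × List Char) : List Char × List (List Char) :=
  if r.1 then (st.1 ++ r.2, st.2) else (st.1 ++ st.2.headD [], st.2.tail)

def reverseStringWithDelimiters_alt (word_string : String) (delimiters : List String) : String :=
  let d := pvIsDelim delimiters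
  let rs := word_string.toList.foldl (pvStepRuns d) []
  let revWords := ((rs.filter (fun r => !r.1)).map (·.2)).reverse
  String.mk ((rs.foldl pvStepFill ([], revWords)).1)

-- ===== PRECONDITION & SPEC =====
-- Pre_ excludes only the empty string, on which A raises IndexError (word_string[0]).
def Pre_reverseStringWithDelimiters (word_string : String) (delimiters : List String) : Prop :=
  word_string ≠ ""
instance (word_string : String) (delimiters : List String) : Decidable (Pre_reverseStringWithDelimiters word_string delimiters) := by unfold Pre_reverseStringWithDelimiters; infer_instance
def pvWitness_reverseStringWithDelimiters : String × List String := ("ab, cd ef", [" ", ","])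

def Spec_reverseStringWithDelimiters (word_string : String) (delimiters : List String) (out : String) : Prop := out = reverseStringWithDelimiters_alt word_string delimiters
instance (word_string : String) (delimiters : List String) (out : String) : Decidable (Spec_reverseStringWithDelimiters word_string delimiters out) := by unfold Spec_reverseStringWithDelimiters; infer_instance

-- ===== CLAIM (what is proved, stated in full; the proofs are below) =====
def Claim_equal_reverseStringWithDelimiters : Prop := ∀ (word_string : String) (delimiters : List String), Dom_reverseStringWithDelimiters word_string delimiters → Pre_reverseStringWithDelimiters word_string delimiters → Spec_reverseStringWithDelimiters word_string delimiters (reverseStringWithDelimiters word_string delimiters)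
-- ===== LEMMAS AND PROOFS =====

-- reference tokenization: maximal runs; flag b = on_word (chars of the run satisfy d = !b)
def pvRuns2 (d : Char → Bool) : Bool → List Char → List Char → List (Bool × List Char)
  | b, nw, [] => [(b, nw)]
  | b, nw, c :: cs => if d c == !b then pvRuns2 d b (nw ++ [c]) cs else (b, nw) :: pvRuns2 d (!b) [c] cs

def pvWordsOf (rs : List (Bool × List Char)) : List (List Char) := (rs.filter (·.1)).map (·.2)
def pvSpacesOf (rs : List (Bool × List Char)) : List (List Char) := (rs.filter (fun r => !r.1)).map (·.2)

def pvMapFlip (rs : List (Bool × List Char)) : List (Bool × List Char) := rs.map (fun r => (!r.1, r.2))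

def pvAlt : Bool → List (Bool × List Char) → Bool
  | _, [] => true
  | b, r :: rs => (r.1 == b) && pvAlt (!b) rs

-- interleave, swapping roles each step
def pvIL : List (List Char) → List (List Char) → List Char
  | [], _ => []
  | x :: xs, ys => x ++ pvIL ys xs
termination_by xs ys => xs.length + ys.length
decreasing_by simp; omega

def pvFillSpec : List (Bool × List Char) → List (List Char) → List Char
  | [], _ => []
  | r :: rs, rem => if r.1 then r.2 ++ pvFillSpec rs rem else rem.headD [] ++ pvFillSpec rs rem.tail

theorem pvLA (d : Char → Bool) :
    ∀ (cs : List Char) (b : Bool) (nw : List Char) (ws ss : List (List Char)),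
    (let F := List.foldl (pvStepA d) (ws, ss, b, nw) cs;
      ((if F.2.2.1 then F.2.2.2 :: F.1 else F.1),
       (if F.2.2.1 then F.2.1 else F.2.1 ++ [F.2.2.2])))
    = ((pvWordsOf (pvRuns2 d b nw cs)).reverse ++ ws, ss ++ pvSpacesOf (pvRuns2 d b nw cs)) := by
  intro cs
  induction cs with
  | nil =>
    intro b nw ws ss
    cases b <;> simp [pvRuns2, pvWordsOf, pvSpacesOf]
  | cons c cs ih =>
    intro b nw ws ss
    cases hb : b <;> cases hc : d c <;>
      simp only [List.foldl_cons, pvStepA, hc, hb, Bool.true_and, Bool.false_and,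
        Bool.and_true, Bool.and_false, Bool.not_true, Bool.not_false, Bool.or_true,
        Bool.or_false, Bool.true_or, Bool.false_or, if_true, if_false, pvRuns2,
        Bool.true_beq, Bool.false_beq, beq_self_eq_true, ite_true, ite_false] <;>
      simp only [ih, pvWordsOf, pvSpacesOf, List.filter_cons] <;>
      simp [List.append_assoc]

theorem pvLB (d : Char → Bool) :
    ∀ (cs : List Char) (pre : List (Bool × List Char)) (b : Bool) (nw : List Char),
    List.foldl (pvStepRuns d) (pre ++ [(!b, nw)]) cs = pre ++ pvMapFlip (pvRuns2 d b nw cs) := by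
  intro cs
  induction cs with
  | nil => intro pre b nw; simp [pvRuns2, pvMapFlip]
  | cons c cs ih =>
    intro pre b nw
    simp only [List.foldl_cons, pvStepRuns, List.getLast?_concat, List.dropLast_concat]
    by_cases h : d c = !b
    · rw [show ((!b) == d c) = true by simp [h]]
      simp only [ite_true, pvRuns2, h, beq_self_eq_true, ite_true]
      exact ih pre b (nw ++ [c])
    · have hb2 : d c = b := by revert h; cases d c <;> cases b <;> simp
      rw [show ((!b) == d c) = false by simp [hb2]]
      have hcond : (d c == !b) = false := by simp [h]
      simp only [ite_false, pvRuns2, hcond, Bool.false_eq_true]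
      rw [show ((pre ++ [(!b, nw)]) ++ [(d c, [c])] : List (Bool × List Char))
            = (pre ++ [(!b, nw)]) ++ [(!(!b), [c])] by simp [hb2]]
      rw [ih (pre ++ [(!b, nw)]) (!b) [c]]
      simp [pvMapFlip]

theorem pvAlt_runs2 (d : Char → Bool) :
    ∀ (cs : List Char) (b : Bool) (nw : List Char), pvAlt b (pvRuns2 d b nw cs) = true := by
  intro cs
  induction cs with
  | nil => intro b nw; simp [pvRuns2, pvAlt]
  | cons c cs ih =>
    intro b nw
    by_cases h : d c = !b
    · simp [pvRuns2, h, ih]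
    · have h' : (d c == !b) = false := by simp [h]
      simp [pvRuns2, h', pvAlt, ih]

theorem pvAlt_counts :
    ∀ (rs : List (Bool × List Char)) (b : Bool), pvAlt b rs = true →
    if b then (pvSpacesOf rs).length ≤ (pvWordsOf rs).length ∧ (pvWordsOf rs).length ≤ (pvSpacesOf rs).length + 1
    else (pvWordsOf rs).length ≤ (pvSpacesOf rs).length ∧ (pvSpacesOf rs).length ≤ (pvWordsOf rs).length + 1 := by
  intro rs
  induction rs with
  | nil => intro b _; cases b <;> simp [pvWordsOf, pvSpacesOf]
  | cons r rs ih =>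
    intro b h
    simp only [pvAlt, Bool.and_eq_true, beq_iff_eq] at h
    obtain ⟨hr, ha⟩ := h
    have := ih (!b) ha
    cases b <;> simp only [Bool.not_true, Bool.not_false, if_true, if_false, ite_true, ite_false] at this ⊢ <;>
      · simp only [pvWordsOf, pvSpacesOf, List.filter_cons, hr] <;>
        simp [pvWordsOf, pvSpacesOf, hr] at this ⊢ <;> omega

theorem pvFL :
    ∀ (rs : List (Bool × List Char)) (out : List Char) (rem : List (List Char)),
    (List.foldl pvStepFill (out, rem) rs).1 = out ++ pvFillSpec rs rem := by
  intro rs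
  induction rs with
  | nil => intro out rem; simp [pvFillSpec]
  | cons r rs ih =>
    intro out rem
    by_cases h : r.1 = true <;>
      simp [pvStepFill, pvFillSpec, h, ih, List.append_assoc]

theorem pvFS :
    ∀ (rs : List (Bool × List Char)) (b : Bool), pvAlt b rs = true →
    ∀ (W : List (List Char)), W.length = (pvWordsOf rs).length →
    pvFillSpec (pvMapFlip rs) W = if b then pvIL W (pvSpacesOf rs) else pvIL (pvSpacesOf rs) W := by
  intro rs
  induction rs with
  | nil =>
    intro b _ W hW
    have : W = [] := by
      cases W with
      | nil => rfl
      | cons x xs => simp [pvWordsOf] at hW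
    subst this
    cases b <;> simp [pvFillSpec, pvMapFlip, pvIL, pvSpacesOf]
  | cons r rs ih =>
    intro b h W hW
    simp only [pvAlt, Bool.and_eq_true, beq_iff_eq] at h
    obtain ⟨hr, ha⟩ := h
    cases b with
    | true =>
      -- word run: reversed-words list must be nonempty
      have hW' : W.length = (pvWordsOf rs).length + 1 := by
        simpa [pvWordsOf, List.filter_cons, hr] using hW
      cases W with
      | nil => simp at hW'
      | cons w W' =>
        have := ih false ha W' (by simpa using hW')
        simp only [pvMapFlip, List.map_cons, pvFillSpec, hr, Bool.not_true, ite_false,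
          List.headD_cons, List.tail_cons] at this ⊢
        rw [show pvFillSpec (rs.map fun r => (!r.1, r.2)) W' = pvIL (pvSpacesOf rs) W' by
          simpa [pvMapFlip, ite_false] using this]
        have hsp : pvSpacesOf ((r.1, r.2) :: rs) = pvSpacesOf rs := by
          simp [pvSpacesOf, List.filter_cons, hr]
        simp [pvIL, pvSpacesOf, List.filter_cons, hr]
    | false =>
      have := ih true ha W (by simpa [pvWordsOf, List.filter_cons, hr] using hW)
      simp only [pvMapFlip, List.map_cons, pvFillSpec, hr, Bool.not_false, ite_true] at this ⊢
      rw [show pvFillSpec (rs.map fun r => (!r.1, r.2)) W = pvIL W (pvSpacesOf rs) by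
        simpa [pvMapFlip, ite_true] using this]
      simp [pvIL, pvSpacesOf, List.filter_cons, hr]

theorem pvMapFlip_words (rs : List (Bool × List Char)) :
    ((pvMapFlip rs).filter (fun r => !r.1)).map (·.2) = pvWordsOf rs := by
  induction rs with
  | nil => simp [pvMapFlip, pvWordsOf]
  | cons r rs ih =>
    by_cases h : r.1 = true <;>
      simp [pvMapFlip, pvWordsOf, List.filter_cons, h, ih] <;>
      simpa [pvMapFlip, pvWordsOf] using ih

theorem pvZT (W S : List (List Char)) (h1 : S.length ≤ W.length) (h2 : W.length ≤ S.length + 1) :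
    ∀ (j k : Nat) (out : List Char), k + j = S.length →
    (List.foldl (pvZStep W S) (out, true) (List.range' (2*k) (W.length + S.length - 2*k))).1
      = out ++ pvIL (W.drop k) (S.drop k) := by
  intro j
  induction j with
  | zero =>
    intro k out hk
    have hk' : k = S.length := by omega
    by_cases hW : W.length = S.length
    · have : W.length + S.length - 2*k = 0 := by omega
      rw [this]
      have : W.drop k = [] := by
        apply List.drop_eq_nil_of_le; omega
      simp [this, pvIL]
    · have hW1 : W.length = S.length + 1 := by omega
      have : W.length + S.length - 2*k = 1 := by omega
      rw [this]
      have hkW : k < W.length := by omega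
      rw [List.range'_succ]
      simp only [List.range'_zero, List.foldl_cons, List.foldl_nil, pvZStep, ite_true]
      have hdiv : 2*k/2 = k := by omega
      rw [hdiv, List.getD_eq_getElem W [] hkW]
      have hdW : W.drop k = W[k] :: W.drop (k+1) := List.drop_eq_getElem_cons hkW
      have hdS : S.drop k = [] := by apply List.drop_eq_nil_of_le; omega
      have hdW1 : W.drop (k+1) = [] := by apply List.drop_eq_nil_of_le; omega
      simp [hdW, hdS, hdW1, pvIL]
  | succ j ih =>
    intro k out hk
    have hkS : k < S.length := by omega
    have hkW : k < W.length := by omega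
    have hm : W.length + S.length - 2*k = ((W.length + S.length - 2*(k+1)) + 1) + 1 := by omega
    rw [hm, List.range'_succ, List.range'_succ]
    simp only [List.foldl_cons]
    rw [show ∀ (o : List Char), pvZStep W S (o, true) (2*k) = (o ++ W.getD (2*k/2) [], false) from
      fun o => by simp [pvZStep]]
    rw [show ∀ (o : List Char), pvZStep W S (o, false) (2*k+1) = (o ++ S.getD ((2*k+1)/2) [], true) from
      fun o => by simp [pvZStep]]
    have hd1 : 2*k/2 = k := by omega
    have hd2 : (2*k+1)/2 = k := by omega
    rw [hd1, hd2]
    have : 2*k + 1 + 1 = 2*(k+1) := by omega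
    rw [this, ih (k+1) _ (by omega)]
    rw [List.getD_eq_getElem W [] hkW, List.getD_eq_getElem S [] hkS]
    conv_rhs => rw [List.drop_eq_getElem_cons hkW, List.drop_eq_getElem_cons hkS]
    rw [pvIL, pvIL]
    simp [List.append_assoc]

theorem pvZF (W S : List (List Char)) (h1 : W.length ≤ S.length) (h2 : S.length ≤ W.length + 1) :
    ∀ (j k : Nat) (out : List Char), k + j = W.length →
    (List.foldl (pvZStep W S) (out, false) (List.range' (2*k) (W.length + S.length - 2*k))).1
      = out ++ pvIL (S.drop k) (W.drop k) := by
  intro j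
  induction j with
  | zero =>
    intro k out hk
    have hk' : k = W.length := by omega
    by_cases hS : S.length = W.length
    · have : W.length + S.length - 2*k = 0 := by omega
      rw [this]
      have : S.drop k = [] := by apply List.drop_eq_nil_of_le; omega
      simp [this, pvIL]
    · have hS1 : S.length = W.length + 1 := by omega
      have : W.length + S.length - 2*k = 1 := by omega
      rw [this]
      have hkS : k < S.length := by omega
      rw [List.range'_succ]
      simp only [List.range'_zero, List.foldl_cons, List.foldl_nil, pvZStep, ite_false]
      have hdiv : 2*k/2 = k := by omega
      rw [hdiv, List.getD_eq_getElem S [] hkS]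
      have hdS : S.drop k = S[k] :: S.drop (k+1) := List.drop_eq_getElem_cons hkS
      have hdW : W.drop k = [] := by apply List.drop_eq_nil_of_le; omega
      have hdS1 : S.drop (k+1) = [] := by apply List.drop_eq_nil_of_le; omega
      simp [hdS, hdW, hdS1, pvIL]
  | succ j ih =>
    intro k out hk
    have hkW : k < W.length := by omega
    have hkS : k < S.length := by omega
    have hm : W.length + S.length - 2*k = ((W.length + S.length - 2*(k+1)) + 1) + 1 := by omega
    rw [hm, List.range'_succ, List.range'_succ]
    simp only [List.foldl_cons]
    rw [show ∀ (o : List Char), pvZStep W S (o, false) (2*k) = (o ++ S.getD (2*k/2) [], true) from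
      fun o => by simp [pvZStep]]
    rw [show ∀ (o : List Char), pvZStep W S (o, true) (2*k+1) = (o ++ W.getD ((2*k+1)/2) [], false) from
      fun o => by simp [pvZStep]]
    have hd1 : 2*k/2 = k := by omega
    have hd2 : (2*k+1)/2 = k := by omega
    rw [hd1, hd2]
    have : 2*k + 1 + 1 = 2*(k+1) := by omega
    rw [this, ih (k+1) _ (by omega)]
    rw [List.getD_eq_getElem W [] hkW, List.getD_eq_getElem S [] hkS]
    conv_rhs => rw [List.drop_eq_getElem_cons hkS, List.drop_eq_getElem_cons hkW]
    rw [pvIL, pvIL]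
    simp [List.append_assoc]

-- ===== VERDICT (by name: the statement is the Claim_ definition above) =====
theorem reverseStringWithDelimiters_spec : Claim_equal_reverseStringWithDelimiters := by
  intro word_string delimiters _hDom hPre
  unfold Spec_reverseStringWithDelimiters reverseStringWithDelimiters reverseStringWithDelimiters_alt
  cases hc : word_string.toList with
  | nil => exact absurd (String.toList_eq_nil_iff.mp hc) hPre
  | cons c0 rest =>
    simp only []
    set d := pvIsDelim delimiters with hd
    set ow0 := !(d c0) with how0
    -- the reference run list
    set R := pvRuns2 d ow0 [c0] rest with hRdef
    have hR0 : pvRuns2 d ow0 [] (c0 :: rest) = R := by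
      rw [pvRuns2]
      have : (d c0 == !ow0) = true := by rw [how0, Bool.not_not]; exact beq_self_eq_true _
      simp only [this, ite_true, List.nil_append]; rw [hRdef]
    -- A side: the two lists built by the first loop
    have hA := pvLA d (c0 :: rest) ow0 [] [] []
    simp only [hR0, List.append_nil, List.nil_append] at hA
    have hA1 := congrArg Prod.fst hA
    have hA2 := congrArg Prod.snd hA
    simp only at hA1 hA2
    -- B side: the run list equals the flipped reference runs
    have hrs : List.foldl (pvStepRuns d) [] (c0 :: rest) = pvMapFlip R := by
      have h0 : pvStepRuns d [] c0 = [] ++ [(!ow0, [c0])] := by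
        simp [pvStepRuns, how0, Bool.not_not]
      rw [List.foldl_cons, h0, pvLB d rest [] ow0 [c0], List.nil_append]
    -- shared data
    set W := (pvWordsOf R).reverse with hW
    set S := pvSpacesOf R with hS
    have halt : pvAlt ow0 R = true := pvAlt_runs2 d rest ow0 [c0]
    have hWlen : W.length = (pvWordsOf R).length := by simp [hW]
    -- B's value
    have hBval : (List.foldl pvStepFill ([], ((pvMapFlip R).filter (fun r => !r.1)).map (·.2) |>.reverse) (pvMapFlip R)).1
        = if ow0 then pvIL W S else pvIL S W := by
      rw [pvMapFlip_words R, pvFL, List.nil_append]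
      exact pvFS R ow0 halt W hWlen
    -- A's value
    have hcounts := pvAlt_counts R ow0 halt
    have hAval : (List.foldl (pvZStep W S) ([], ow0) (List.range (W.length + S.length))).1
        = if ow0 then pvIL W S else pvIL S W := by
      rw [List.range_eq_range']
      cases how : ow0 with
      | true =>
        rw [how] at hcounts
        simp only [if_true] at hcounts ⊢
        have := pvZT W S (by simpa [hW, hS, pvWordsOf, pvSpacesOf] using hcounts.1)
          (by simpa [hW, hS, pvWordsOf, pvSpacesOf] using hcounts.2) S.length 0 [] (by omega)
        simpa using this
      | false =>
        rw [how] at hcounts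
        simp only [if_false, Bool.false_eq_true] at hcounts ⊢
        have := pvZF W S (by simpa [hW, hS, pvWordsOf, pvSpacesOf] using hcounts.1)
          (by simpa [hW, hS, pvWordsOf, pvSpacesOf] using hcounts.2) W.length 0 [] (by omega)
        simpa using this
    -- assemble
    rw [hrs, hA1, hA2, hAval, hBval]
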